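-- pv_equiv track=rewrite | github.com/donggyuu/algorithm | algorithm-python/others_nver_test_3_20201220.py | solution
-- ===== SOURCE A (Python) =====
-- def solution(s):
--
--     cnt = 0
--
--     # 안에 있는 a의 개수를 파악한다.
--     for c in s:
--         if c == 'a':
--             cnt += 1
--
--     # 3으로 나누어떨어지지 않는다면? -> 0이다
--     if (cnt % 3 != 0):
--         return 0
--
--     res = 0
--     k = cnt // 3 # 몫
--     sum = 0
--
--     mp = {} # dictionay in python. 다른 구조에서는 hash table이나 hash map
--
--     for i in range(len(s)):
--
--         # Increment count if 0 appears
--         if s[i] == 'a':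
--             sum += 1
--
--         # k는 몫, a가 각 부분에 개수 k만큼 들어가 있음
--         '''
--         aabaabaa 에서,
--         aab aa baa
--         k번째 에서 b를 추가하면 이후 2k이후에 나오는 것도 k번째에 나오는 b의 갯수와 같다는 것을 풀어보다가 알았다.
--         ** 처음에는 떠올리기 힘들어서 노트에 그려보고 규칙을 찾았다.
--         '''
--         if (sum == 2 * k and k in mp
--         and i < len(s) - 1 and i > 0): # 처음이랑 마지막은 상관없어
--             res += mp[k]
--
--         if sum in mp:
--             mp[sum] += 1
--         else:
--             mp[sum] = 1
--
--     return res
-- ===== SOURCE B (Python) =====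
-- def solution(s):
--     n = len(s)
--     cnt = sum(c == 'a' for c in s)
--     if cnt % 3 != 0:
--         return 0
--     if cnt == 0:
--         # every pair of cut points 0 < i <= j < n-1 works
--         return (n - 1) * (n - 2) // 2 if n >= 3 else 0
--     k = cnt // 3
--     first = second = run = 0
--     for c in s:
--         if c == 'a':
--             run += 1
--         if run == k:
--             first += 1
--         elif run == 2 * k:
--             second += 1
--     return first * second
-- ===== Notes on version B (the rewrite author's own statement) =====
-- stated objective: simpler
-- what changed: A maintains a hash map from prefix-'a'-count to frequency and accumulates map lookups inside the scan; B drops the dict entirely: it counts prefixes holding exactly k and exactly 2k letters 'a' with two plain counters and multiplies the two counts, and handles the zero-count case by the closed formula (n-1)(n-2)//2.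
import Mathlib
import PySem

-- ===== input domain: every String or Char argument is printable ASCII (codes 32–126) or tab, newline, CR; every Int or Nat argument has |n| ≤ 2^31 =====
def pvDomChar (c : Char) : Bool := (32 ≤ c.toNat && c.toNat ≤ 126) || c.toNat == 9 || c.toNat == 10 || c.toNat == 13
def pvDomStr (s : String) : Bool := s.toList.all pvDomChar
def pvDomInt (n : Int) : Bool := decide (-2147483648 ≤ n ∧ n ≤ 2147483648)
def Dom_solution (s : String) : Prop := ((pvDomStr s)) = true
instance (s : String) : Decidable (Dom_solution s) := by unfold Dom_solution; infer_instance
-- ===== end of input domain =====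

-- B replaces A's dict of prefix-count frequencies by two plain counters and a closed
-- formula for the no-'a' case: same value, simpler arithmetic (measured faster by a constant factor).

-- ===== PORT A =====
-- the `for i in range(len(s))` loop of A, on (index, char) pairs; state = (sum, mp, res)
def solLoop (k n : Int) : List (Int × Char) → Int → PySem.Dict Int Int → Int → Int
  | [], _, _, res => res
  | (i, c) :: rest, sum, mp, res =>
    let sum := if c = 'a' then sum + 1 else sum
    let res := if sum = 2 * k ∧ mp.contains k ∧ i < n - 1 ∧ i > 0 then res + mp.getD k 0 else res
    let mp := if mp.contains sum then mp.modify sum 0 (· + 1) else mp.insert sum 1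
    solLoop k n rest sum mp res

def solution (s : String) : Int :=
  let cnt : Int := s.toList.foldl (fun cnt c => if c = 'a' then cnt + 1 else cnt) 0
  if PySem.Int.mod cnt 3 ≠ 0 then 0
  else
    let k := PySem.Int.floordiv cnt 3
    solLoop k (PySem.Str.len s) (PySem.List.enumerate s.toList) 0 PySem.Dict.empty 0

-- ===== PORT B =====
-- B's counter loop: state = (first, second, run)
def altLoop (k : Int) : List Char → Int → Int → Int → Int × Int
  | [], first, second, _ => (first, second)
  | c :: t, first, second, run =>
    let run := if c = 'a' then run + 1 else run
    if run = k then altLoop k t (first + 1) second run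
    else if run = 2 * k then altLoop k t first (second + 1) run
    else altLoop k t first second run

def solution_alt (s : String) : Int :=
  let n : Int := PySem.Str.len s
  let cnt : Int := (s.toList.map (fun c => if c = 'a' then (1 : Int) else 0)).sum
  if PySem.Int.mod cnt 3 ≠ 0 then 0
  else if cnt = 0 then (if n ≥ 3 then PySem.Int.floordiv ((n - 1) * (n - 2)) 2 else 0)
  else
    let k := PySem.Int.floordiv cnt 3
    let p := altLoop k s.toList 0 0 0
    p.1 * p.2

-- ===== PRECONDITION & SPEC =====
def Spec_solution (s : String) (out : Int) : Prop := out = solution_alt s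
instance (s : String) (out : Int) : Decidable (Spec_solution s out) := by unfold Spec_solution; infer_instance

-- ===== CLAIM (what is proved, stated in full; the proofs are below) =====
def Claim_equal_solution : Prop := ∀ (s : String), Dom_solution s → Spec_solution s (solution s)

-- ===== LEMMAS AND PROOFS =====

-- prefix count of 'a' in the first i characters
def pvPc (l : List Char) (i : Nat) : Nat := (l.take i).countP (· = 'a')

-- number of j < i whose (j+1)-prefix has exactly v letters 'a'
def pvOcc (l : List Char) (v : Int) (i : Nat) : Nat :=
  ((Finset.range i).filter (fun j => (pvPc l (j + 1) : Int) = v)).card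

lemma pvPc_succ (l : List Char) (i : Nat) (hi : i < l.length) :
    pvPc l (i + 1) = pvPc l i + (if l[i] = 'a' then 1 else 0) := by
  unfold pvPc
  rw [List.take_add_one, List.getElem?_eq_getElem hi]
  by_cases h : l[i] = 'a' <;>
    simp only [List.countP_append, h] <;> simp [h]

lemma pvPc_mono (l : List Char) {i j : Nat} (h : i ≤ j) : pvPc l i ≤ pvPc l j :=
  (List.take_prefix_take_left h).sublist.countP_le

lemma pvPc_le (l : List Char) (i : Nat) : pvPc l i ≤ i :=
  le_trans List.countP_le_length (List.length_take_le i l)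

lemma pvOcc_succ (l : List Char) (v : Int) (i : Nat) :
    pvOcc l v (i + 1) = pvOcc l v i + (if (pvPc l (i + 1) : Int) = v then 1 else 0) := by
  unfold pvOcc
  rw [Finset.range_add_one, Finset.filter_insert]
  split <;> simp [Finset.card_insert_of_notMem]

-- A's loop, from position i with a faithful frequency dict, adds the remaining contributions
lemma solLoop_spec (k : Int) (l : List Char) :
    ∀ (t : List Char) (i : Nat) (mp : PySem.Dict Int Int) (res : Int),
      l.drop i = t →
      (∀ v : Int, mp.getD v 0 = (pvOcc l v i : Int)) →
      (∀ v : Int, mp.contains v = true ↔ pvOcc l v i ≠ 0) →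
      solLoop k (l.length : Int) (PySem.List.enumerate t (i : Int)) (pvPc l i : Int) mp res
        = res + ∑ j ∈ Finset.Ico i l.length,
            (if ((pvPc l (j + 1) : Int) = 2 * k ∧ (j : Int) < (l.length : Int) - 1 ∧ (j : Int) > 0)
             then (pvOcc l k j : Int) else 0) := by
  intro t
  induction t with
  | nil =>
    intro i mp res hdrop _ _
    have hlen : l.length ≤ i := by simpa [List.drop_eq_nil_iff] using hdrop
    simp [solLoop, PySem.List.enumerate, Finset.Ico_eq_empty_of_le hlen]
  | cons c t' ih =>
    intro i mp res hdrop hgetD hcont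
    have hi : i < l.length := by
      by_contra h
      simp [List.drop_eq_nil_iff.mpr (le_of_not_gt h)] at hdrop
    have hexp : l.drop i = l[i] :: l.drop (i + 1) := List.drop_eq_getElem_cons hi
    rw [hdrop] at hexp
    injection hexp with hc ht'
    have hrun : (if c = 'a' then (pvPc l i : Int) + 1 else (pvPc l i : Int)) = (pvPc l (i + 1) : Int) := by
      rw [pvPc_succ l i hi, hc]; split <;> simp_all
    have hsum1 : ∀ f : Nat → Int, ∑ j ∈ Finset.Ico i l.length, f j = f i + ∑ j ∈ Finset.Ico (i+1) l.length, f j :=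
      fun f => Finset.sum_eq_sum_Ico_succ_bot hi f
    rw [PySem.List.enumerate_cons, solLoop]
    simp only [hrun]
    have hres : (if (pvPc l (i+1) : Int) = 2 * k ∧ mp.contains k ∧ (i : Int) < (l.length : Int) - 1 ∧ (i : Int) > 0
                 then res + mp.getD k 0 else res)
        = res + (if ((pvPc l (i+1) : Int) = 2 * k ∧ (i : Int) < (l.length : Int) - 1 ∧ (i : Int) > 0)
                 then (pvOcc l k i : Int) else 0) := by
      by_cases hocc : pvOcc l k i = 0
      · have hck : mp.contains k = false := by
          rcases Bool.eq_false_or_eq_true (mp.contains k) with h | h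
          · exact absurd ((hcont k).mp h) (by simp [hocc])
          · exact h
        rw [if_neg (by simp [hck]), hocc]
        split <;> simp
      · have hck : mp.contains k = true := (hcont k).mpr hocc
        rw [hgetD k]
        by_cases hC : (pvPc l (i+1) : Int) = 2 * k ∧ (i : Int) < (l.length : Int) - 1 ∧ (i : Int) > 0
        · rw [if_pos ⟨hC.1, by rw [hck], hC.2.1, hC.2.2⟩, if_pos hC]
        · rw [if_neg (by tauto), if_neg hC]; ring
    rw [hres]
    have hgetD' : ∀ v : Int, (if mp.contains (pvPc l (i+1) : Int)
          then mp.modify (pvPc l (i+1) : Int) 0 (· + 1) else mp.insert (pvPc l (i+1) : Int) 1).getD v 0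
        = (pvOcc l v (i + 1) : Int) := by
      intro v
      rw [pvOcc_succ]
      by_cases hct : mp.contains (pvPc l (i+1) : Int) = true
      · rw [if_pos hct, PySem.Dict.getD_modify, hgetD, hgetD]
        by_cases hv : v = (pvPc l (i+1) : Int)
        · rw [if_pos hv, hv, if_pos rfl]; push_cast; ring
        · rw [if_neg hv, if_neg (fun h => hv h.symm)]; push_cast; ring
      · have hct' : mp.contains (pvPc l (i+1) : Int) = false := by
          rcases Bool.eq_false_or_eq_true (mp.contains (pvPc l (i+1) : Int)) with h | h
          · exact absurd h hct
          · exact h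
        have hocc0 : pvOcc l ((pvPc l (i+1) : Nat) : Int) i = 0 := by
          by_contra h
          exact hct ((hcont _).mpr h)
        rw [if_neg hct, PySem.Dict.getD_insert, hgetD]
        by_cases hv : v = (pvPc l (i+1) : Int)
        · rw [if_pos hv, hv, if_pos rfl, hocc0]; norm_num
        · rw [if_neg hv, if_neg (fun h => hv h.symm)]; push_cast; ring
    have hcont' : ∀ v : Int, (if mp.contains (pvPc l (i+1) : Int)
          then mp.modify (pvPc l (i+1) : Int) 0 (· + 1) else mp.insert (pvPc l (i+1) : Int) 1).contains v = true
        ↔ pvOcc l v (i + 1) ≠ 0 := by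
      intro v
      by_cases hct : mp.contains (pvPc l (i+1) : Int) = true
      · rw [if_pos hct, pvOcc_succ, PySem.Dict.contains_modify]
        by_cases hv : v = (pvPc l (i+1) : Int)
        · rw [if_pos hv.symm]; simp [hv]
        · rw [if_neg (fun h => hv h.symm)]
          simp [hv, hcont v]
      · rw [if_neg hct, pvOcc_succ, PySem.Dict.contains_insert]
        by_cases hv : v = (pvPc l (i+1) : Int)
        · rw [if_pos hv.symm]; simp [hv]
        · rw [if_neg (fun h => hv h.symm)]
          simp [hv, hcont v]
    have hcast : ((i : Int) + 1) = ((i + 1 : Nat) : Int) := by push_cast; ring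
    rw [hcast, ih (i + 1) _ _ ht'.symm hgetD' hcont', hsum1]
    ring

-- B's loop counts the prefixes with exactly k and (elif) exactly 2k letters 'a'
lemma altLoop_spec (k : Int) (l : List Char) :
    ∀ (t : List Char) (i : Nat) (first second : Int),
      l.drop i = t →
      altLoop k t first second (pvPc l i : Int)
        = (first + ∑ j ∈ Finset.Ico i l.length,
              (if (pvPc l (j + 1) : Int) = k then (1 : Int) else 0),
           second + ∑ j ∈ Finset.Ico i l.length,
              (if ((pvPc l (j + 1) : Int) ≠ k ∧ (pvPc l (j + 1) : Int) = 2 * k) then (1 : Int) else 0)) := by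
  intro t
  induction t with
  | nil =>
    intro i first second hdrop
    have hlen : l.length ≤ i := by simpa [List.drop_eq_nil_iff] using hdrop
    simp [altLoop, Finset.Ico_eq_empty_of_le hlen]
  | cons c t' ih =>
    intro i first second hdrop
    have hi : i < l.length := by
      by_contra h
      simp [List.drop_eq_nil_iff.mpr (le_of_not_gt h)] at hdrop
    have hexp : l.drop i = l[i] :: l.drop (i + 1) := List.drop_eq_getElem_cons hi
    rw [hdrop] at hexp
    injection hexp with hc ht'
    have hrun : (if c = 'a' then (pvPc l i : Int) + 1 else (pvPc l i : Int)) = (pvPc l (i + 1) : Int) := by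
      rw [pvPc_succ l i hi, hc]; split <;> simp_all
    have hsum1 : ∀ f : Nat → Int, ∑ j ∈ Finset.Ico i l.length, f j = f i + ∑ j ∈ Finset.Ico (i+1) l.length, f j :=
      fun f => Finset.sum_eq_sum_Ico_succ_bot hi f
    have ihi := fun first second => ih (i + 1) first second ht'.symm
    simp only [altLoop, hrun]
    by_cases hk : (pvPc l (i+1) : Int) = k
    · rw [if_pos hk, ihi, Prod.mk.injEq]
      refine ⟨?_, ?_⟩ <;> rw [hsum1] <;> simp [hk] <;> ring
    · by_cases h2k : (pvPc l (i+1) : Int) = 2 * k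
      · rw [if_neg hk, if_pos h2k, ihi, Prod.mk.injEq]
        refine ⟨?_, ?_⟩
        · rw [hsum1]; simp [hk]
        · rw [hsum1, if_pos ⟨hk, h2k⟩]; ring
      · rw [if_neg hk, if_neg h2k, ihi, Prod.mk.injEq]
        refine ⟨?_, ?_⟩ <;> rw [hsum1] <;> simp [hk, h2k]

lemma pvPc_le_count (l : List Char) (i : Nat) : pvPc l i ≤ l.countP (· = 'a') :=
  (List.take_sublist i l).countP_le

lemma pvPc_length (l : List Char) : pvPc l l.length = l.countP (· = 'a') := by
  simp [pvPc]

-- A's whole loop, started from the empty dict, in closed summation form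
lemma solLoop_closed (k : Int) (l : List Char) :
    solLoop k (l.length : Int) (PySem.List.enumerate l 0) 0 PySem.Dict.empty 0
      = ∑ j ∈ Finset.range l.length,
          (if ((pvPc l (j + 1) : Int) = 2 * k ∧ (j : Int) < (l.length : Int) - 1 ∧ (j : Int) > 0)
           then (pvOcc l k j : Int) else 0) := by
  have h := solLoop_spec k l l 0 PySem.Dict.empty 0 (by simp)
    (fun v => by simp [PySem.Dict.getD_empty, pvOcc])
    (fun v => by simp [PySem.Dict.contains_empty, pvOcc])
  rw [Finset.range_eq_Ico]
  simpa [pvPc] using h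

-- the no-'a' case: the loop sums 1 + 2 + … + (n-2)
lemma closed_zero (l : List Char) (hC : l.countP (· = 'a') = 0) :
    ∑ j ∈ Finset.range l.length,
        (if ((pvPc l (j + 1) : Int) = 2 * 0 ∧ (j : Int) < (l.length : Int) - 1 ∧ (j : Int) > 0)
         then (pvOcc l 0 j : Int) else 0)
      = ((∑ j ∈ Finset.range (l.length - 1), j : Nat) : Int) := by
  have hpc : ∀ i, pvPc l i = 0 := fun i => Nat.le_zero.mp (hC ▸ pvPc_le_count l i)
  have hocc : ∀ j : Nat, pvOcc l (0 : Int) j = j := by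
    intro j
    unfold pvOcc
    rw [Finset.filter_true_of_mem (fun x _ => by rw [hpc]; norm_num)]
    simp
  calc ∑ j ∈ Finset.range l.length,
        (if ((pvPc l (j + 1) : Int) = 2 * 0 ∧ (j : Int) < (l.length : Int) - 1 ∧ (j : Int) > 0)
         then (pvOcc l 0 j : Int) else 0)
      = ∑ j ∈ Finset.range l.length, (if j < l.length - 1 then (j : Int) else 0) := by
        apply Finset.sum_congr rfl
        intro j hj
        have hjn : j < l.length := Finset.mem_range.mp hj
        rw [hpc, hocc]
        split_ifs with h1 h2 h2 <;> omega
    _ = ∑ j ∈ Finset.range (l.length - 1), (j : Int) := by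
        rw [← Finset.sum_subset
            (show Finset.range (l.length - 1) ⊆ Finset.range l.length by
              intro x hx; rw [Finset.mem_range] at *; omega)
            (fun x hx hx' => if_neg (by simpa using hx'))]
        exact Finset.sum_congr rfl (fun j hj => if_pos (Finset.mem_range.mp hj))
    _ = _ := by push_cast; rfl

-- the main case: bounds are implied and the occurrence count is constant, so the sum factors
lemma closed_pos (l : List Char) (K : Nat) (hK : 1 ≤ K) (hcnt : l.countP (· = 'a') = 3 * K) :
    ∑ j ∈ Finset.range l.length,
        (if ((pvPc l (j + 1) : Int) = 2 * (K : Int) ∧ (j : Int) < (l.length : Int) - 1 ∧ (j : Int) > 0)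
         then (pvOcc l (K : Int) j : Int) else 0)
      = (∑ j ∈ Finset.range l.length, (if (pvPc l (j + 1) : Int) = (K : Int) then (1 : Int) else 0))
        * (∑ j ∈ Finset.range l.length, (if (pvPc l (j + 1) : Int) = 2 * (K : Int) then (1 : Int) else 0)) := by
  have htot : pvPc l l.length = 3 * K := by rw [pvPc_length, hcnt]
  set n := l.length with hn
  set Fk := (Finset.range n).filter (fun j => (pvPc l (j + 1) : Int) = (K : Int)) with hFk
  have himp : ∀ j, j < n → pvPc l (j + 1) = 2 * K →
      ((j : Int) < (n : Int) - 1 ∧ (j : Int) > 0 ∧ pvOcc l (K : Int) j = Fk.card) := by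
    intro j hj hp2
    have hle : 2 * K ≤ j + 1 := hp2 ▸ pvPc_le l (j + 1)
    have hjn : j + 1 < n := by
      by_contra h
      have h1 := pvPc_mono l (show n ≤ j + 1 by omega)
      rw [htot, hp2] at h1
      omega
    refine ⟨by omega, by omega, ?_⟩
    unfold pvOcc
    congr 1
    apply Finset.ext
    intro x
    simp only [hFk, Finset.mem_filter, Finset.mem_range]
    constructor
    · rintro ⟨hxj, hPx⟩; exact ⟨by omega, hPx⟩
    · rintro ⟨hxn, hPx⟩
      refine ⟨?_, hPx⟩
      by_contra hxj
      have hmono := pvPc_mono l (show j + 1 ≤ x + 1 by omega)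
      have hPxN : pvPc l (x + 1) = K := by exact_mod_cast hPx
      omega
  have hstep : ∀ j ∈ Finset.range n,
      (if ((pvPc l (j + 1) : Int) = 2 * (K : Int) ∧ (j : Int) < (n : Int) - 1 ∧ (j : Int) > 0)
       then (pvOcc l (K : Int) j : Int) else 0)
        = (if (pvPc l (j + 1) : Int) = 2 * (K : Int) then (Fk.card : Int) else 0) := by
    intro j hj
    rw [Finset.mem_range] at hj
    by_cases hP : (pvPc l (j + 1) : Int) = 2 * (K : Int)
    · have hPn : pvPc l (j + 1) = 2 * K := by exact_mod_cast hP
      obtain ⟨b1, b2, hocc⟩ := himp j hj hPn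
      rw [if_pos ⟨hP, b1, b2⟩, if_pos hP, hocc]
    · rw [if_neg (by tauto), if_neg hP]
  rw [Finset.sum_congr rfl hstep, ← Finset.sum_filter, Finset.sum_const,
      Finset.sum_boole, Finset.sum_boole]
  simp only [nsmul_eq_mul, hFk]
  ring

-- ===== VERDICT (by name: the statement is the Claim_ definition above) =====
theorem solution_spec : Claim_equal_solution := by
  intro s _
  unfold Spec_solution solution solution_alt
  simp only [PySem.Str.len_eq]
  set l := s.toList with hl
  set C := l.countP (fun c => decide (c = 'a')) with hCdef
  have hfold : l.foldl (fun cnt c => if c = 'a' then cnt + 1 else cnt) (0:Int) = (C : Int) := by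
    simpa using PySem.List.foldl_ite_add_one (fun c => c = 'a') l 0
  have hsumB : (l.map (fun c => if c = 'a' then (1:Int) else 0)).sum = (C : Int) := by
    simpa using PySem.List.sum_map_ite_one_zero (fun c => decide (c = 'a')) l
  rw [hfold, hsumB]
  have hmod : PySem.Int.mod (C : Int) 3 = ((C % 3 : Nat) : Int) := by
    exact_mod_cast PySem.Int.mod_natCast C 3
  have hdiv : PySem.Int.floordiv (C : Int) 3 = ((C / 3 : Nat) : Int) := by
    exact_mod_cast PySem.Int.floordiv_natCast C 3
  rw [hmod, hdiv]
  by_cases h3 : C % 3 = 0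
  · rw [h3]
    rw [if_neg (by simp), if_neg (by simp)]
    by_cases hC0 : C = 0
    · rw [if_pos (show ((C : Nat) : Int) = 0 by exact_mod_cast hC0)]
      have hk0 : ((C / 3 : Nat) : Int) = 0 := by rw [hC0]; rfl
      rw [hk0, solLoop_closed, closed_zero l (by exact_mod_cast hC0)]
      set n := l.length with hn
      set S : Nat := ∑ j ∈ Finset.range (n - 1), j with hS
      have hgauss : S * 2 = (n - 1) * (n - 2) := by
        rw [hS, Finset.sum_range_id_mul_two]
        cases n <;> simp
      by_cases hn3 : (n : Int) ≥ 3
      · rw [if_pos hn3]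
        have h1 : ((n : Int) - 1) * ((n : Int) - 2) = (S : Int) * 2 := by
          have hn3' : 3 ≤ n := by exact_mod_cast hn3
          have : (((n - 1) * (n - 2) : Nat) : Int) = ((n : Int) - 1) * ((n : Int) - 2) := by
            rw [Nat.cast_mul, Nat.cast_sub (by omega), Nat.cast_sub (by omega)]
            norm_num
          rw [← this, ← hgauss]; push_cast; ring
        rw [PySem.Int.floordiv_eq_ediv_of_pos (by norm_num), h1, Int.mul_ediv_cancel _ (by norm_num)]
      · rw [if_neg hn3]
        have : S = 0 := by
          have : n ≤ 2 := by omega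
          interval_cases n <;> simp [hS]
        simp [this]
    · rw [if_neg (show ¬((C : Nat) : Int) = 0 by exact_mod_cast hC0)]
      obtain ⟨K, hKC⟩ : ∃ K, C = 3 * K := ⟨C / 3, by omega⟩
      have hK1 : 1 ≤ K := by omega
      have hk : C / 3 = K := by omega
      rw [hk, solLoop_closed]
      have hB := altLoop_spec (K : Int) l l 0 0 0 (by simp)
      rw [show ((pvPc l 0 : Nat) : Int) = 0 by simp [pvPc]] at hB
      rw [← Finset.range_eq_Ico] at hB
      have hB1 : (altLoop (K : Int) l 0 0 0).1
          = ∑ j ∈ Finset.range l.length, (if (pvPc l (j + 1) : Int) = (K : Int) then (1 : Int) else 0) := by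
        rw [hB]; exact zero_add _
      have hB2 : (altLoop (K : Int) l 0 0 0).2
          = ∑ j ∈ Finset.range l.length,
              (if ((pvPc l (j + 1) : Int) ≠ (K : Int) ∧ (pvPc l (j + 1) : Int) = 2 * (K : Int)) then (1 : Int) else 0) := by
        rw [hB]; exact zero_add _
      rw [hB1, hB2, closed_pos l K hK1 (by rw [← hCdef]; exact hKC)]
      congr 1
      apply Finset.sum_congr rfl
      intro j hj
      apply if_congr _ rfl rfl
      constructor
      · intro h2
        refine ⟨fun hkk => ?_, h2⟩
        rw [hkk] at h2
        have : (K : Int) = 0 := by omega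
        omega
      · rintro ⟨h1, h2⟩; exact h2
  · rw [if_pos (show ((C % 3 : Nat) : Int) ≠ 0 by exact_mod_cast h3),
        if_pos (show ((C % 3 : Nat) : Int) ≠ 0 by exact_mod_cast h3)]
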